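-- pv_equiv track=rewrite | github.com/Baglecake/lddx-hackathon | app/review.py | _clean_categories
-- ===== SOURCE A (Python) =====
-- CATEGORY_RENAMES = {
--     'Cardiovascular': 'Cardiovascular',
--     'Cardiovascular (extended)': 'Cardiovascular',
--     'Renal': 'Renal / Nephrology',
--     'Respiratory': 'Respiratory / Pulmonary',
--     'Endocrine': 'Endocrine / Metabolic',
--     'Hematology': 'Hematology / Oncology',
--     'Rheumatology': 'Rheumatology',
--     'Infectious': 'Infectious Disease',
--     'Infectious Disease': 'Infectious Disease',
--     'Neurology': 'Neurology',
--     'Neurology / Spine': 'Neurology',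
--     'Gastroenterology': 'Gastroenterology / GI',
--     'Movement Disorders / Psychiatry': 'Psychiatry / Neurology',
--     'Headache': 'Neurology',
--     'Hypertension subtypes': 'Cardiovascular',
--     'Urological': 'Urology',
--     'Neonatal': 'Neonatal / Pediatric',
--     'Neonatal / Blood group': 'Neonatal / Pediatric',
--     'Thyroid': 'Endocrine / Metabolic',
--     'Oncology / Hematology (extended)': 'Hematology / Oncology',
--     'Other': 'General / Other',
--     'Vascular / Erectile': 'Cardiovascular',
--     'Epidural / Obstetric': 'Obstetrics / Anesthesia',
--     'Neuromuscular': 'Neurology',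
--     'Overdose / Intoxication': 'Toxicology / Emergency',
--     'Microbiology / Infectious synonyms': 'Infectious Disease',
--     'Toxicology / Poisoning': 'Toxicology / Emergency',
--     'Surgical / Post-operative': 'Surgery / Post-operative',
--     'Reproductive / Gynecological': 'Obstetrics / Gynecology',
--     'Vestibular / ENT': 'ENT / Otolaryngology',
--     'GI / Abdominal': 'Gastroenterology / GI',
--     'Psychiatric': 'Psychiatry / Neurology',
--     'Psychiatric (additional)': 'Psychiatry / Neurology',
--     'Prostate': 'Urology',
--     'GI specifics': 'Gastroenterology / GI',
--     'Musculoskeletal': 'Musculoskeletal / Orthopedic',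
--     'Hearing': 'ENT / Otolaryngology',
--     'Neck / Lymph': 'General / Other',
--     'Fracture matching': 'Musculoskeletal / Orthopedic',
--     'Infection categorical': 'Infectious Disease',
--     'Hepatitis': 'Gastroenterology / GI',
--     'Obesity subtypes (GT uses these)': 'Endocrine / Metabolic',
--     'Tuberculosis variants': 'Infectious Disease',
--     'Urinary': 'Urology',
--     'Pediatric / Congenital': 'Neonatal / Pediatric',
--     'Seizures': 'Neurology',
--     'Cardiac / Ischemia': 'Cardiovascular',
--     'Polyps': 'Gastroenterology / GI',
-- }
--
-- def _clean_categories(raw_cats):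
--     merged = {}
--     for raw_name, entries in raw_cats.items():
--         clean = CATEGORY_RENAMES.get(raw_name, raw_name)
--         # Skip entries that are clearly code comments not medical categories
--         if any(w in clean.lower() for w in ['round ', 'zero-recall', 'additions', 'fixes', 'remaining']):
--             clean = 'General / Other'
--         if clean not in merged:
--             merged[clean] = []
--         merged[clean].extend(entries)
--     # Sort by category name
--     return dict(sorted(merged.items()))
-- ===== SOURCE B (Python) =====
-- # B: the rename table transposed to canonical->aliases groups; sort the cleaned
-- # (name, entries) pairs stably by name, then merge consecutive runs of equal
-- # names with a nested-while scan (no dict accumulation, no post-sort).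
-- _ALIAS_GROUPS = [
--     ('Cardiovascular', ['Cardiovascular', 'Cardiovascular (extended)', 'Hypertension subtypes', 'Vascular / Erectile', 'Cardiac / Ischemia']),
--     ('Renal / Nephrology', ['Renal']),
--     ('Respiratory / Pulmonary', ['Respiratory']),
--     ('Endocrine / Metabolic', ['Endocrine', 'Thyroid', 'Obesity subtypes (GT uses these)']),
--     ('Hematology / Oncology', ['Hematology', 'Oncology / Hematology (extended)']),
--     ('Rheumatology', ['Rheumatology']),
--     ('Infectious Disease', ['Infectious', 'Infectious Disease', 'Microbiology / Infectious synonyms', 'Infection categorical', 'Tuberculosis variants']),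
--     ('Neurology', ['Neurology', 'Neurology / Spine', 'Headache', 'Neuromuscular', 'Seizures']),
--     ('Gastroenterology / GI', ['Gastroenterology', 'GI / Abdominal', 'GI specifics', 'Hepatitis', 'Polyps']),
--     ('Psychiatry / Neurology', ['Movement Disorders / Psychiatry', 'Psychiatric', 'Psychiatric (additional)']),
--     ('Urology', ['Urological', 'Prostate', 'Urinary']),
--     ('Neonatal / Pediatric', ['Neonatal', 'Neonatal / Blood group', 'Pediatric / Congenital']),
--     ('General / Other', ['Other', 'Neck / Lymph']),
--     ('Obstetrics / Anesthesia', ['Epidural / Obstetric']),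
--     ('Toxicology / Emergency', ['Overdose / Intoxication', 'Toxicology / Poisoning']),
--     ('Surgery / Post-operative', ['Surgical / Post-operative']),
--     ('Obstetrics / Gynecology', ['Reproductive / Gynecological']),
--     ('ENT / Otolaryngology', ['Vestibular / ENT', 'Hearing']),
--     ('Musculoskeletal / Orthopedic', ['Musculoskeletal', 'Fracture matching']),
-- ]
--
-- def _canonical(raw_name):
--     for canon, aliases in _ALIAS_GROUPS:
--         if raw_name in aliases:
--             return canon
--     return raw_name
--
-- def _is_noise(name):
--     low = name.lower()
--     return ('round ' in low or 'zero-recall' in low or 'additions' in low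
--             or 'fixes' in low or 'remaining' in low)
--
-- def _clean_name(raw_name):
--     c = _canonical(raw_name)
--     return 'General / Other' if _is_noise(c) else c
--
-- def _clean_categories(raw_cats):
--     pairs = sorted(((_clean_name(n), list(es)) for n, es in raw_cats.items()),
--                    key=lambda p: p[0])
--     result = {}
--     i = 0
--     while i < len(pairs):
--         name, entries = pairs[i]
--         i += 1
--         while i < len(pairs) and pairs[i][0] == name:
--             entries = entries + pairs[i][1]
--             i += 1
--         result[name] = entries
--     return result
-- ===== Notes on version B (the rewrite author's own statement) =====
-- stated objective: alternative
-- what changed: B stores the rename table transposed as canonical-name -> alias-list groups and resolves each raw name by scanning the groups, then stably sorts the cleaned (name, entries) pairs and merges consecutive runs of equal names with a nested-while scan, instead of A's dict lookup, accumulate-into-dict and post-sort of the items.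
import Mathlib
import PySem

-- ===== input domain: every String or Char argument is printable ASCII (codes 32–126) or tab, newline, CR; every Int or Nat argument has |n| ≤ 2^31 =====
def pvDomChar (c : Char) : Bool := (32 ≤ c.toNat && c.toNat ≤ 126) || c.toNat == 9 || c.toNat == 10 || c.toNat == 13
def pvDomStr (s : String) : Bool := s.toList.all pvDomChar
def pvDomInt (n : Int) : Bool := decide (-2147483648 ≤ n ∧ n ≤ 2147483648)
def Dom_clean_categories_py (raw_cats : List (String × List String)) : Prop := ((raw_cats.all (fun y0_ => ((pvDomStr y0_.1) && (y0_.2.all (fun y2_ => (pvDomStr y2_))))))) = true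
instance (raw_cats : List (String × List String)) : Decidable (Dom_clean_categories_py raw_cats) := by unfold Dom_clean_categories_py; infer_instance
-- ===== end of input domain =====

-- B stores the rename table transposed as canonical→aliases groups, stably sorts the cleaned
-- (name, entries) pairs and merges consecutive runs of equal names, instead of A's dict-get
-- rename, accumulate-into-dict and post-sort (objective: alternative).

-- ===== PORT A =====
-- module-level constant CATEGORY_RENAMES (a dict literal with distinct keys)
def pvRenames : PySem.Dict String String := PySem.Dict.mk [
  ("Cardiovascular", "Cardiovascular"),
  ("Cardiovascular (extended)", "Cardiovascular"),
  ("Renal", "Renal / Nephrology"),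
  ("Respiratory", "Respiratory / Pulmonary"),
  ("Endocrine", "Endocrine / Metabolic"),
  ("Hematology", "Hematology / Oncology"),
  ("Rheumatology", "Rheumatology"),
  ("Infectious", "Infectious Disease"),
  ("Infectious Disease", "Infectious Disease"),
  ("Neurology", "Neurology"),
  ("Neurology / Spine", "Neurology"),
  ("Gastroenterology", "Gastroenterology / GI"),
  ("Movement Disorders / Psychiatry", "Psychiatry / Neurology"),
  ("Headache", "Neurology"),
  ("Hypertension subtypes", "Cardiovascular"),
  ("Urological", "Urology"),
  ("Neonatal", "Neonatal / Pediatric"),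
  ("Neonatal / Blood group", "Neonatal / Pediatric"),
  ("Thyroid", "Endocrine / Metabolic"),
  ("Oncology / Hematology (extended)", "Hematology / Oncology"),
  ("Other", "General / Other"),
  ("Vascular / Erectile", "Cardiovascular"),
  ("Epidural / Obstetric", "Obstetrics / Anesthesia"),
  ("Neuromuscular", "Neurology"),
  ("Overdose / Intoxication", "Toxicology / Emergency"),
  ("Microbiology / Infectious synonyms", "Infectious Disease"),
  ("Toxicology / Poisoning", "Toxicology / Emergency"),
  ("Surgical / Post-operative", "Surgery / Post-operative"),
  ("Reproductive / Gynecological", "Obstetrics / Gynecology"),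
  ("Vestibular / ENT", "ENT / Otolaryngology"),
  ("GI / Abdominal", "Gastroenterology / GI"),
  ("Psychiatric", "Psychiatry / Neurology"),
  ("Psychiatric (additional)", "Psychiatry / Neurology"),
  ("Prostate", "Urology"),
  ("GI specifics", "Gastroenterology / GI"),
  ("Musculoskeletal", "Musculoskeletal / Orthopedic"),
  ("Hearing", "ENT / Otolaryngology"),
  ("Neck / Lymph", "General / Other"),
  ("Fracture matching", "Musculoskeletal / Orthopedic"),
  ("Infection categorical", "Infectious Disease"),
  ("Hepatitis", "Gastroenterology / GI"),
  ("Obesity subtypes (GT uses these)", "Endocrine / Metabolic"),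
  ("Tuberculosis variants", "Infectious Disease"),
  ("Urinary", "Urology"),
  ("Pediatric / Congenital", "Neonatal / Pediatric"),
  ("Seizures", "Neurology"),
  ("Cardiac / Ischemia", "Cardiovascular"),
  ("Polyps", "Gastroenterology / GI")]

def clean_categories_py (raw_cats : List (String × List String)) : List (String × List String) :=
  let merged := raw_cats.foldl (fun merged p =>
    let clean := pvRenames.getD p.1 p.1
    let clean := if ["round ", "zero-recall", "additions", "fixes", "remaining"].any
        (fun w => PySem.Str.isIn w (PySem.Str.lower clean)) then "General / Other" else clean
    let merged := if merged.contains clean then merged else merged.insert clean []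
    merged.modify clean [] (fun v => v ++ p.2)) PySem.Dict.empty
  -- dict(sorted(merged.items())): merged's keys are distinct, so Python's tuple
  -- comparison only ever compares the first components
  PySem.List.sorted merged.items (fun q => q.1)

-- ===== PORT B =====
-- B's module constant _ALIAS_GROUPS: the rename table transposed, canonical name → raw aliases
def bAliasGroups : List (String × List String) := [
  ("Cardiovascular", ["Cardiovascular", "Cardiovascular (extended)", "Hypertension subtypes", "Vascular / Erectile", "Cardiac / Ischemia"]),
  ("Renal / Nephrology", ["Renal"]),
  ("Respiratory / Pulmonary", ["Respiratory"]),
  ("Endocrine / Metabolic", ["Endocrine", "Thyroid", "Obesity subtypes (GT uses these)"]),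
  ("Hematology / Oncology", ["Hematology", "Oncology / Hematology (extended)"]),
  ("Rheumatology", ["Rheumatology"]),
  ("Infectious Disease", ["Infectious", "Infectious Disease", "Microbiology / Infectious synonyms", "Infection categorical", "Tuberculosis variants"]),
  ("Neurology", ["Neurology", "Neurology / Spine", "Headache", "Neuromuscular", "Seizures"]),
  ("Gastroenterology / GI", ["Gastroenterology", "GI / Abdominal", "GI specifics", "Hepatitis", "Polyps"]),
  ("Psychiatry / Neurology", ["Movement Disorders / Psychiatry", "Psychiatric", "Psychiatric (additional)"]),
  ("Urology", ["Urological", "Prostate", "Urinary"]),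
  ("Neonatal / Pediatric", ["Neonatal", "Neonatal / Blood group", "Pediatric / Congenital"]),
  ("General / Other", ["Other", "Neck / Lymph"]),
  ("Obstetrics / Anesthesia", ["Epidural / Obstetric"]),
  ("Toxicology / Emergency", ["Overdose / Intoxication", "Toxicology / Poisoning"]),
  ("Surgery / Post-operative", ["Surgical / Post-operative"]),
  ("Obstetrics / Gynecology", ["Reproductive / Gynecological"]),
  ("ENT / Otolaryngology", ["Vestibular / ENT", "Hearing"]),
  ("Musculoskeletal / Orthopedic", ["Musculoskeletal", "Fracture matching"])]

-- _canonical: scan the groups for one whose alias list contains the raw name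
def bCanonical (raw_name : String) : String :=
  match bAliasGroups.find? (fun g => g.2.contains raw_name) with
  | some g => g.1
  | none => raw_name

-- _is_noise: the keyword test as an or-chain over the lowered name
def bIsNoise (name : String) : Bool :=
  let low := PySem.Str.lower name
  PySem.Str.isIn "round " low || PySem.Str.isIn "zero-recall" low ||
    PySem.Str.isIn "additions" low || PySem.Str.isIn "fixes" low ||
    PySem.Str.isIn "remaining" low

def bCleanName (raw_name : String) : String :=
  let c := bCanonical raw_name
  if bIsNoise c then "General / Other" else c

-- the nested-while run-merging scan of B, as structural recursion over the sorted pairs: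
-- the inner while extends the current run (c, es); the outer while emits it and starts the next
def bGroup : String → List String → List (String × List String) → List (String × List String)
  | c, es, [] => [(c, es)]
  | c, es, (d, fs) :: ps => if d == c then bGroup c (es ++ fs) ps else (c, es) :: bGroup d fs ps

def clean_categories_py_alt (raw_cats : List (String × List String)) : List (String × List String) :=
  match PySem.List.sorted (raw_cats.map (fun p => (bCleanName p.1, p.2))) (fun q => q.1) with
  | [] => []
  | (c, es) :: t => bGroup c es t

-- ===== PRECONDITION & SPEC =====
def Spec_clean_categories_py (raw_cats : List (String × List String)) (out : List (String × List String)) : Prop := out = clean_categories_py_alt raw_cats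
instance (raw_cats : List (String × List String)) (out : List (String × List String)) : Decidable (Spec_clean_categories_py raw_cats out) := by unfold Spec_clean_categories_py; infer_instance

-- ===== CLAIM (what is proved, stated in full; the proofs are below) =====
def Claim_equal_clean_categories_py : Prop := ∀ (raw_cats : List (String × List String)), Dom_clean_categories_py raw_cats → Spec_clean_categories_py raw_cats (clean_categories_py raw_cats)

-- ===== LEMMAS AND PROOFS =====

-- helper definitions used only by the proofs
-- A's per-item cleaning, named (A's port computes it inline)
def pvCleanP (raw_name : String) : String :=
  let clean := pvRenames.getD raw_name raw_name
  if ["round ", "zero-recall", "additions", "fixes", "remaining"].any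
      (fun w => PySem.Str.isIn w (PySem.Str.lower clean)) then
    "General / Other"
  else clean

def pvKeysList : List String := pvRenames.items.map (fun q => q.1)

def pvStep (d : PySem.Dict String (List String)) (q : String × List String) : PySem.Dict String (List String) :=
  d.modify q.1 [] (fun v => v ++ q.2)

def pvCanon (l : List (String × List String)) : List (String × List String) :=
  (PySem.Set.ofList (l.map (fun q => q.1))).map
    (fun c => (c, ((l.filter (fun q => q.1 == c)).map (fun q => q.2)).flatten))

-- the two per-item cleaners agree
theorem pv_canonical_eq (s : String) : bCanonical s = pvRenames.getD s s := by
  by_cases hm : s ∈ pvKeysList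
  · fin_cases hm <;> rfl
  · have hnc : pvRenames.contains s = false := by
      apply List.any_eq_false.mpr
      intro p hp
      have hne : p.1 ≠ s := fun h => hm (h ▸ List.mem_map_of_mem hp)
      simp [hne]
    have hsub : ∀ g ∈ bAliasGroups, ∀ a ∈ g.2, a ∈ pvKeysList := by decide
    have hfind : bAliasGroups.find? (fun g => g.2.contains s) = none := by
      apply List.find?_eq_none.mpr
      intro g hg
      simp only [List.contains_eq_mem, decide_eq_true_eq]
      intro hsg
      exact hm (hsub g hg s hsg)
    unfold bCanonical
    rw [hfind, PySem.Dict.getD_of_not_contains pvRenames s hnc]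

theorem pv_noise_eq (c : String) :
    (["round ", "zero-recall", "additions", "fixes", "remaining"].any
      (fun w => PySem.Str.isIn w (PySem.Str.lower c))) = bIsNoise c := by
  simp [bIsNoise, List.any_cons, List.any_nil, Bool.or_assoc]

theorem pv_clean_eq (s : String) : bCleanName s = pvCleanP s := by
  rw [bCleanName, pvCleanP, pv_canonical_eq, pv_noise_eq]

-- ===== A side: the fold builds exactly the canonical grouping =====
theorem pv_map_repl_eq_self (its : List (String × List String)) (c : String) (v : List String)
    (h : its.any (fun p => p.1 == c) = false) :
    its.map (fun p => if p.1 == c then (c, v) else p) = its := by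
  induction its with
  | nil => rfl
  | cons x xs ih =>
    simp only [List.any_cons, Bool.or_eq_false_iff] at h
    rw [List.map_cons, if_neg (by simp [h.1]), ih h.2]

theorem pv_step_eq (d : PySem.Dict String (List String)) (c : String) (es : List String) :
    ((if d.contains c then d else d.insert c []).modify c [] (fun v => v ++ es)) =
      d.modify c [] (fun v => v ++ es) := by
  by_cases h : d.contains c
  · simp [h]
  · rw [if_neg h]
    have hc : d.contains c = false := by simpa using h
    simp only [PySem.Dict.modify, PySem.Dict.getD_insert_self,
      PySem.Dict.getD_of_not_contains d [] hc, List.nil_append]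
    apply PySem.Dict.ext
    rw [PySem.Dict.items_insert_of_contains _ es (PySem.Dict.contains_insert_self d c []),
      PySem.Dict.items_insert_of_not_contains _ [] hc,
      PySem.Dict.items_insert_of_not_contains _ es hc,
      List.map_append]
    have hb : d.items.any (fun p => p.1 == c) = false := hc
    rw [pv_map_repl_eq_self d.items c es hb]
    simp

theorem pv_getD_fold (l : List (String × List String)) (d : PySem.Dict String (List String))
    (c : String) :
    (l.foldl pvStep d).getD c [] =
      d.getD c [] ++ ((l.filter (fun q => q.1 == c)).map (fun q => q.2)).flatten := by
  induction l generalizing d with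
  | nil => simp
  | cons q t ih =>
    rw [List.foldl_cons, ih]
    by_cases hqc : c = q.1
    · subst hqc
      simp [pvStep]
    · have hb : (q.1 == c) = false := by simpa using fun h => hqc h.symm
      simp [pvStep, PySem.Dict.getD_modify, hqc, hb]

theorem pv_keys_fold (l : List (String × List String)) :
    (l.foldl pvStep PySem.Dict.empty).keys = PySem.Set.ofList (l.map (fun q => q.1)) := by
  have h := PySem.Dict.keys_foldl_modify_key l (fun q => q.1) ([] : List String)
      (fun _ q => fun v => v ++ q.2) PySem.Dict.empty
  simpa [pvStep, PySem.Dict.keys, PySem.Dict.empty, PySem.Set.update_nil_left] using h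

theorem pv_items_fold (l : List (String × List String)) :
    (l.foldl pvStep PySem.Dict.empty).items = pvCanon l := by
  have hk := pv_keys_fold l
  have hnd : (l.foldl pvStep PySem.Dict.empty).keys.Nodup := by
    rw [hk]; exact PySem.Set.nodup_ofList _
  rw [PySem.Dict.items_eq_map_keys _ hnd ([] : List String), hk]
  unfold pvCanon
  refine List.map_congr_left (fun c _ => ?_)
  rw [pv_getD_fold l PySem.Dict.empty c]
  simp

theorem pv_A_eq (raw_cats : List (String × List String)) :
    clean_categories_py raw_cats =
      PySem.List.sorted (pvCanon (raw_cats.map (fun p => (pvCleanP p.1, p.2)))) (fun q => q.1) := by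
  show PySem.List.sorted (raw_cats.foldl (fun merged p =>
      (if merged.contains (pvCleanP p.1) then merged else merged.insert (pvCleanP p.1) []).modify
        (pvCleanP p.1) [] (fun v => v ++ p.2)) PySem.Dict.empty).items (fun q => q.1) = _
  have hf : (fun (merged : PySem.Dict String (List String)) (p : String × List String) =>
      (if merged.contains (pvCleanP p.1) then merged else merged.insert (pvCleanP p.1) []).modify
        (pvCleanP p.1) [] (fun v => v ++ p.2))
      = (fun merged p => pvStep merged (pvCleanP p.1, p.2)) := by
    funext d p
    exact pv_step_eq d (pvCleanP p.1) p.2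
  rw [hf, show (fun (merged : PySem.Dict String (List String)) (p : String × List String) =>
      pvStep merged (pvCleanP p.1, p.2))
    = (fun d p => pvStep d ((fun p : String × List String => (pvCleanP p.1, p.2)) p)) from rfl,
    ← List.foldl_map, pv_items_fold]

-- ===== B side: run-merging a sorted list is the canonical grouping =====
theorem pv_ofList_cons_cons (x : String) (xs : List String) :
    PySem.Set.ofList (x :: x :: xs) = PySem.Set.ofList (x :: xs) := by
  simp [PySem.Set.ofList_eq_foldl, PySem.Set.add, PySem.Set.contains]

theorem pv_ofList_cons_not_mem (c : String) (ks : List String) (h : c ∉ ks) :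
    PySem.Set.ofList (c :: ks) = c :: PySem.Set.ofList ks := by
  rw [PySem.Set.ofList_cons]
  congr 1
  simp only [PySem.Set.discard]
  apply List.filter_eq_self.2
  intro y hy
  have hyk : y ∈ ks := (PySem.Set.mem_ofList _ _).1 hy
  have hne : y ≠ c := fun hyc => h (hyc ▸ hyk)
  simpa using hne

theorem pv_grp_spec (ps : List (String × List String)) :
    ∀ (c : String) (es : List String),
    ((c, es) :: ps).Pairwise (fun a b => a.1 ≤ b.1) → bGroup c es ps = pvCanon ((c, es) :: ps) := by
  induction ps with
  | nil =>
    intro c es _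
    simp [bGroup, pvCanon, PySem.Set.ofList_eq_foldl, PySem.Set.add, PySem.Set.contains]
  | cons p t ih =>
    intro c es hpw
    obtain ⟨d, fs⟩ := p
    by_cases hdc : d = c
    · rw [hdc] at hpw ⊢
      rw [show bGroup c es ((c, fs) :: t) = bGroup c (es ++ fs) t from by simp [bGroup]]
      have hpw1 := (List.pairwise_cons.1 hpw).1
      have hpw2 := List.pairwise_cons.1 (List.pairwise_cons.1 hpw).2
      have hpw' : ((c, es ++ fs) :: t).Pairwise (fun a b => a.1 ≤ b.1) :=
        List.pairwise_cons.2 ⟨fun b hb => hpw1 b (List.mem_cons_of_mem _ hb), hpw2.2⟩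
      rw [ih c (es ++ fs) hpw']
      unfold pvCanon
      simp only [List.map_cons]
      rw [pv_ofList_cons_cons]
      refine List.map_congr_left (fun k hk => ?_)
      by_cases hkc : c = k
      · subst hkc
        simp [List.append_assoc]
      · have hb : (c == k) = false := by simpa using hkc
        simp [hb]
    · have hb : (d == c) = false := by simpa using hdc
      rw [show bGroup c es ((d, fs) :: t) = (c, es) :: bGroup d fs t from by simp [bGroup, hb]]
      have hpwt : ((d, fs) :: t).Pairwise (fun a b => a.1 ≤ b.1) := (List.pairwise_cons.1 hpw).2
      rw [ih d fs hpwt]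
      have hcnot : c ∉ ((d, fs) :: t).map (fun q => q.1) := by
        intro hc
        rcases List.mem_map.1 hc with ⟨b, hbmem, hbc⟩
        rcases List.mem_cons.1 hbmem with rfl | hbt
        · exact hdc hbc
        · have h2 : d ≤ b.1 := (List.pairwise_cons.1 hpwt).1 b hbt
          have h3 : c ≤ d := (List.pairwise_cons.1 hpw).1 (d, fs) List.mem_cons_self
          exact hdc (le_antisymm (hbc ▸ h2) h3)
      symm
      unfold pvCanon
      simp only [List.map_cons]
      rw [pv_ofList_cons_not_mem c _ (by simpa using hcnot), List.map_cons]
      congr 1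
      · have hnil : (((d, fs) :: t).filter (fun q => q.1 == c)) = [] := by
          apply List.filter_eq_nil_iff.2
          intro a ha hac
          exact hcnot (List.mem_map.2 ⟨a, ha, by simpa using hac⟩)
        simp [hnil]
      · refine List.map_congr_left (fun k hk => ?_)
        have hkmem : k ∈ ((d, fs) :: t).map (fun q => q.1) := by
          have := (PySem.Set.mem_ofList _ _).1 hk
          simpa using this
        have hkc : (c == k) = false := by
          simpa using fun h : c = k => hcnot (h ▸ hkmem)
        simp [List.filter_cons, hkc]

theorem pv_B_eq (raw_cats : List (String × List String)) :
    clean_categories_py_alt raw_cats =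
      pvCanon (PySem.List.sorted (raw_cats.map (fun p => (bCleanName p.1, p.2))) (fun q => q.1)) := by
  unfold clean_categories_py_alt
  have hpw := PySem.List.sorted_pairwise (raw_cats.map (fun p => (bCleanName p.1, p.2)))
      (fun q => q.1)
  cases hsp : PySem.List.sorted (raw_cats.map (fun p => (bCleanName p.1, p.2))) (fun q => q.1) with
  | nil => rfl
  | cons hd tl =>
    obtain ⟨c, es⟩ := hd
    rw [hsp] at hpw
    exact pv_grp_spec tl c es hpw

-- stability of the sort with respect to filtering at one key
theorem pv_filter_insertBy_neg {α : Type} (b : α → α → Bool) (x : α) (p : α → Bool)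
    (hx : p x = false) (acc : List α) :
    (PySem.List.insertBy b x acc).filter p = acc.filter p := by
  induction acc with
  | nil => simp [PySem.List.insertBy, hx]
  | cons y ys ih =>
    simp only [PySem.List.insertBy]
    split
    · simp [hx]
    · simp [List.filter_cons, ih]

theorem pv_filter_insertBy_pos (c : String) (x : String × List String) (hx : x.1 = c)
    (acc : List (String × List String)) :
    acc.Pairwise (fun a b => a.1 ≤ b.1) →
    (PySem.List.insertBy (fun a b => decide (a.1 < b.1)) x acc).filter (fun p => p.1 == c) =
      acc.filter (fun p => p.1 == c) ++ [x] := by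
  induction acc with
  | nil => intro _; simp [PySem.List.insertBy, hx]
  | cons y ys ih =>
    intro hpw
    simp only [PySem.List.insertBy]
    split
    · next hlt =>
      have hcy : c < y.1 := hx ▸ of_decide_eq_true hlt
      have hnil : (y :: ys).filter (fun p => p.1 == c) = [] := by
        apply List.filter_eq_nil_iff.2
        intro a ha hac
        have hya : y.1 ≤ a.1 := by
          rcases List.mem_cons.1 ha with rfl | hat
          · exact le_refl _
          · exact List.rel_of_pairwise_cons hpw hat
        have hac' : a.1 = c := by simpa using hac
        exact absurd (hac' ▸ hya) (not_le.2 hcy)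
      rw [List.filter_cons_of_pos (by simp [hx]), hnil]
      rfl
    · next _ =>
      rw [List.filter_cons, List.filter_cons, ih (List.Pairwise.of_cons hpw)]
      split <;> simp

theorem pv_sorted_filter_aux (r : List (String × List String)) (c : String) :
    (PySem.List.sorted r.reverse (fun q => q.1)).filter (fun p => p.1 == c) =
      r.reverse.filter (fun p => p.1 == c) := by
  induction r with
  | nil => rfl
  | cons x t ih =>
    rw [List.reverse_cons]
    rw [PySem.List.sorted_eq_foldl_insertBy, List.foldl_append, List.foldl_cons, List.foldl_nil,
      ← PySem.List.sorted_eq_foldl_insertBy]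
    by_cases hxc : x.1 = c
    · rw [pv_filter_insertBy_pos c x hxc _ (PySem.List.sorted_pairwise t.reverse (fun q => q.1)),
        ih]
      simp [List.filter_append, hxc]
    · have hb : (x.1 == c) = false := by simpa using hxc
      rw [pv_filter_insertBy_neg _ x _ hb, ih]
      simp [List.filter_append, hb]

theorem pv_sorted_filter (l : List (String × List String)) (c : String) :
    (PySem.List.sorted l (fun q => q.1)).filter (fun p => p.1 == c) =
      l.filter (fun p => p.1 == c) := by
  have h := pv_sorted_filter_aux l.reverse c
  simpa [List.reverse_reverse] using h

theorem pv_ofList_sublist {α : Type} [BEq α] [LawfulBEq α] (xs : List α) :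
    (PySem.Set.ofList xs).Sublist xs := by
  induction xs with
  | nil => simp [PySem.Set.ofList_eq_foldl]
  | cons x t ih =>
    rw [PySem.Set.ofList_cons]
    exact List.Sublist.cons₂ x (List.Sublist.trans List.filter_sublist ih)

theorem pv_pairwise_and {α : Type} {R S : α → α → Prop} :
    ∀ {l : List α}, l.Pairwise R → l.Pairwise S → l.Pairwise (fun a b => R a b ∧ S a b) := by
  intro l
  induction l with
  | nil => intro _ _; exact List.Pairwise.nil
  | cons x t ih =>
    intro hR hS
    rcases List.pairwise_cons.1 hR with ⟨hR1, hR2⟩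
    rcases List.pairwise_cons.1 hS with ⟨hS1, hS2⟩
    exact List.pairwise_cons.2 ⟨fun b hb => ⟨hR1 b hb, hS1 b hb⟩, ih hR2 hS2⟩

theorem pv_pairwise_lt_ofList (xs : List String) (h : xs.Pairwise (· ≤ ·)) :
    (PySem.Set.ofList xs).Pairwise (· < ·) := by
  have h1 : (PySem.Set.ofList xs).Pairwise (· ≤ ·) :=
    List.Pairwise.sublist (pv_ofList_sublist xs) h
  have h2 : (PySem.Set.ofList xs).Pairwise (· ≠ ·) := PySem.Set.nodup_ofList xs
  exact (pv_pairwise_and h1 h2).imp (fun hab => lt_of_le_of_ne hab.1 hab.2)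

theorem pv_main (raw_cats : List (String × List String)) :
    clean_categories_py raw_cats = clean_categories_py_alt raw_cats := by
  have hmap : (fun p : String × List String => (bCleanName p.1, p.2))
      = (fun p : String × List String => (pvCleanP p.1, p.2)) := by
    funext p; rw [pv_clean_eq]
  rw [pv_A_eq, pv_B_eq, hmap]
  apply PySem.List.sorted_eq_of_perm_of_pairwise_lt
  · -- pvCanon (sorted l) is a permutation of pvCanon l
    unfold pvCanon
    simp only [pv_sorted_filter]
    apply List.Perm.map
    refine (List.perm_ext_iff_of_nodup (PySem.Set.nodup_ofList _) (PySem.Set.nodup_ofList _)).2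
      (fun a => ?_)
    rw [PySem.Set.mem_ofList, PySem.Set.mem_ofList]
    exact ((PySem.List.sorted_perm (raw_cats.map (fun p => (pvCleanP p.1, p.2)))
      (fun q => q.1) false).map (fun q => q.1)).mem_iff
  · -- its first components are strictly increasing
    unfold pvCanon
    apply List.pairwise_map.2
    have hle : ((PySem.List.sorted (raw_cats.map (fun p => (pvCleanP p.1, p.2)))
        (fun q => q.1)).map (fun q => q.1)).Pairwise (· ≤ ·) := by
      apply List.pairwise_map.2
      exact PySem.List.sorted_pairwise _ _
    have := pv_pairwise_lt_ofList _ hle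
    exact this.imp (fun h => h)

-- ===== VERDICT (by name: the statement is the Claim_ definition above) =====
theorem clean_categories_py_spec : Claim_equal_clean_categories_py := by
  intro raw_cats _
  unfold Spec_clean_categories_py
  exact pv_main raw_cats
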